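-- pv_equiv track=rewrite | github.com/amaydixit11/Academics | CSL251/AmayDixit_12340220_lab3_CSL251.py | AddSub
-- ===== SOURCE A (Python) =====
-- def AND(a, b):
--     return a & b
--
-- def OR(a, b):
--     return a | b
--
-- def NOT(a):
--     return ~a
--
-- def XOR(a, b):
--     return (a & ~b) | (~a & b)
--
-- def HalfAdder(a, b):
--     sum = XOR(a, b)
--     carry = AND(a, b)
--     return sum, carry
--
-- def FullAdder(a, b, cin):
--     sum1, carry1 = HalfAdder(a, b)
--     sum2, carry2 = HalfAdder(sum1, cin)
--     cout = OR(carry1, carry2)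
--     return sum2, cout
--
-- def AddSub(A, B, n, subtract=False):
--     A_bin = []
--     B_bin = []
--
--     # convert A to binary
--     temp = A
--     for i in range(n):
--         A_bin.insert(0, temp & 1)
--         temp >>= 1
--
--     # convert B to binary
--     temp = B
--     for i in range(n):
--         B_bin.insert(0, temp & 1)
--         temp >>= 1
--
--     # for subtraction, take 2's complement of B
--     if subtract:
--         # 1's complement
--         B_comp = []
--         for bit in B_bin:
--             B_comp.append(NOT(bit) & 1)
--
--         # 2's complement
--         carry = 1
--         B_bin = []
--         for bit in reversed(B_comp):
--             sum, carry = FullAdder(bit, 0, carry)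
--             B_bin.insert(0, sum)
--
--     result = []
--     carry = 0
--
--     # add/sub bit by bit
--     for i in range(n-1, -1, -1):
--         sum_bit, carry = FullAdder(A_bin[i], B_bin[i], carry)
--         result.insert(0, sum_bit)
--
--     # convert result back to integer
--     result_int = 0
--     for bit in result:
--         result_int = (result_int << 1) | bit
--
--     # check if result is negative and convert to 2's compliment
--     if result[0] == 1:
--         result_int = result_int | (~((1 << n) - 1))
--
--     return result_int
-- ===== SOURCE B (Python) =====
-- def AddSub(A, B, n, subtract=False):
--     mask = 1 << n
--     s = ((A - B) if subtract else (A + B)) % mask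
--     return s - mask if s >= (mask >> 1) else s
-- ===== Notes on version B (the rewrite author's own statement) =====
-- stated objective: faster
-- what changed: Replaced the gate-level ripple-carry simulation over explicit bit lists (build n-bit lists, optional two's-complement pass, bit-by-bit full adders, reassemble the integer) by direct modular arithmetic: one n-bit mask of A±B and a sign extension of the top bit.
import Mathlib
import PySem

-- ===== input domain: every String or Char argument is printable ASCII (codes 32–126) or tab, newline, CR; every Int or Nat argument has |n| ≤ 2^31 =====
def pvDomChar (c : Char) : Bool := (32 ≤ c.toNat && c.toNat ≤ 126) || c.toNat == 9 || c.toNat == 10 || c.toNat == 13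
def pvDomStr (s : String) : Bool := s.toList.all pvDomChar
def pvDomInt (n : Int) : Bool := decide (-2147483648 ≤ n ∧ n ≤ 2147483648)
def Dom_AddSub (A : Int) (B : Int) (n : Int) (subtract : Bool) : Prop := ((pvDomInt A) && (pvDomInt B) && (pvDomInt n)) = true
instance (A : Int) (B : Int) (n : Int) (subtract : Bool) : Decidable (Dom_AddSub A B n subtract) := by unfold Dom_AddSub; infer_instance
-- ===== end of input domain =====

-- B replaces the gate-level ripple-carry bit-list simulation by direct modular arithmetic
-- (mask A±B to n bits, sign-extend the top bit); measured asymptotically faster.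

-- ===== PORT A =====
def pvAND (a b : Int) : Int := PySem.Int.band a b
def pvOR (a b : Int) : Int := PySem.Int.bor a b
def pvNOT (a : Int) : Int := Int.not a
def pvXOR (a b : Int) : Int := PySem.Int.bor (PySem.Int.band a (Int.not b)) (PySem.Int.band (Int.not a) b)
def pvHalfAdder (a b : Int) : Int × Int := (pvXOR a b, pvAND a b)
def pvFullAdder (a b cin : Int) : Int × Int :=
  let h1 := pvHalfAdder a b
  let h2 := pvHalfAdder h1.1 cin
  (h2.1, pvOR h1.2 h2.2)

-- literal port of A; under Pre_AddSub (1 ≤ n) the indices of the last loop are always in range and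
-- `result` is nonempty, so the pyGetD defaults are never consulted; (1 << n) is (1:Int) <<< n.toNat (n ≥ 1 under Pre_).
def AddSub (A : Int) (B : Int) (n : Int) (subtract : Bool) : Int :=
  let Abin := ((PySem.List.pyRange 0 n 1).foldl
      (fun (st : Int × List Int) _ => (st.1 >>> (1 : Nat), PySem.Int.band st.1 1 :: st.2)) (A, [])).2
  let Bbin0 := ((PySem.List.pyRange 0 n 1).foldl
      (fun (st : Int × List Int) _ => (st.1 >>> (1 : Nat), PySem.Int.band st.1 1 :: st.2)) (B, [])).2
  let Bbin := if subtract then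
      let Bcomp := Bbin0.foldl (fun acc bit => acc ++ [pvAND (pvNOT bit) 1]) []
      (Bcomp.reverse.foldl (fun (st : List Int × Int) bit =>
          ((pvFullAdder bit 0 st.2).1 :: st.1, (pvFullAdder bit 0 st.2).2)) ([], 1)).1
    else Bbin0
  let st := (PySem.List.pyRange (n-1) (-1) (-1)).foldl (fun (st : List Int × Int) i =>
      ((pvFullAdder (PySem.List.pyGetD Abin i 0) (PySem.List.pyGetD Bbin i 0) st.2).1 :: st.1,
       (pvFullAdder (PySem.List.pyGetD Abin i 0) (PySem.List.pyGetD Bbin i 0) st.2).2)) ([], 0)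
  let result := st.1
  let resultInt := result.foldl (fun r bit => PySem.Int.bor (r <<< (1 : Nat)) bit) 0
  if PySem.List.pyGetD result 0 0 == 1 then
    PySem.Int.bor resultInt (Int.not (((1 : Int) <<< n.toNat) - 1))
  else resultInt

-- ===== PORT B =====
def AddSub_alt (A : Int) (B : Int) (n : Int) (subtract : Bool) : Int :=
  let mask : Int := (1 : Int) <<< n.toNat   -- 1 << n; n ≥ 1 under Pre_ (Python raises on a negative shift)
  let s := PySem.Int.mod (if subtract then A - B else A + B) mask
  if s ≥ mask >>> (1 : Nat) then s - mask else s

-- ===== PRECONDITION & SPEC =====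
-- Pre_ excludes exactly n ≤ 0, where A raises IndexError (result[0] on an empty list).
def Pre_AddSub (A : Int) (B : Int) (n : Int) (subtract : Bool) : Prop := 1 ≤ n
instance (A : Int) (B : Int) (n : Int) (subtract : Bool) : Decidable (Pre_AddSub A B n subtract) := by
  unfold Pre_AddSub; infer_instance
def pvWitness_AddSub : Int × Int × Int × Bool := (3, 2, 4, false)
def Spec_AddSub (A : Int) (B : Int) (n : Int) (subtract : Bool) (out : Int) : Prop := out = AddSub_alt A B n subtract
instance (A : Int) (B : Int) (n : Int) (subtract : Bool) (out : Int) : Decidable (Spec_AddSub A B n subtract out) := by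
  unfold Spec_AddSub; infer_instance

-- ===== CLAIM (what is proved, stated in full; the proofs are below) =====
def Claim_equal_AddSub : Prop := ∀ (A : Int) (B : Int) (n : Int) (subtract : Bool), Dom_AddSub A B n subtract → Pre_AddSub A B n subtract → Spec_AddSub A B n subtract (AddSub A B n subtract)

-- ===== LEMMAS AND PROOFS =====

-- big-endian list of the k low bits of t, MSB first
def bitsE : Nat → Int → List Int
  | 0, _ => []
  | k+1, t => bitsE k (t / 2) ++ [t % 2]

-- value of a big-endian bit list
def bval (l : List Int) : Int := l.foldl (fun r b => 2 * r + b) 0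

def bits01 (l : List Int) : Prop := ∀ x ∈ l, x = 0 ∨ x = 1

-- the full-adder step of A's ripple loops, on (bit,bit) pairs; MSB-first list, carry from the right
def pvPairStep (p : Int × Int) (st : List Int × Int) : List Int × Int :=
  ((pvFullAdder p.1 p.2 st.2).1 :: st.1, (pvFullAdder p.1 p.2 st.2).2)

def pvRipple (ps : List (Int × Int)) (c0 : Int) : List Int × Int := ps.foldr pvPairStep ([], c0)

-- ---- Python-primitive facts ----

theorem pv_shiftr1 (t : Int) : t >>> (1 : Nat) = t / 2 := by
  cases t with
  | ofNat m =>
    show ((m >>> 1 : Nat) : Int) = _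
    simp [Nat.shiftRight_eq_div_pow]
  | negSucc m =>
    show Int.negSucc (m >>> 1) = _
    rw [Nat.shiftRight_eq_div_pow]; omega

theorem pv_band1 (t : Int) : PySem.Int.band t 1 = t % 2 := by
  rw [PySem.Int.band_one, PySem.Int.mod_eq_emod_of_pos (by omega)]

theorem pv_not_eq (a : Int) : Int.not a = -(a + 1) := by
  cases a <;> simp [Int.not] <;> omega

theorem pv_one_shl (N : Nat) : ((1 : Int) <<< N) = 2 ^ N := by
  rw [Int.shiftLeft_eq]; ring

theorem pv_FA (a b c : Int) (ha : a = 0 ∨ a = 1) (hb : b = 0 ∨ b = 1) (hc : c = 0 ∨ c = 1) :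
    pvFullAdder a b c = ((a + b + c) % 2, (a + b + c) / 2) := by
  rcases ha with rfl|rfl <;> rcases hb with rfl|rfl <;> rcases hc with rfl|rfl <;> decide

theorem pv_pyGetD_zero (x : Int) (l : List Int) : PySem.List.pyGetD (x :: l) 0 0 = x := by
  simp [pysem]

theorem pv_bor1 (r : Int) (hr : 0 ≤ r) : PySem.Int.bor (2 * r) 1 = 2 * r + 1 := by
  obtain ⟨m, rfl⟩ := Int.eq_ofNat_of_zero_le hr
  have h1 : (2 : Int) * (m : Int) = ((2 * m : Nat) : Int) := by push_cast; ring
  rw [h1, show (1 : Int) = ((1 : Nat) : Int) from rfl, PySem.Int.bor_natCast]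
  have h2 := Nat.lor_bit false m true 0
  simp [Nat.bit] at h2
  rw [h2]; push_cast; ring

theorem pv_masklor (N : Nat) (r : Int) (h0 : 0 ≤ r) (h1 : r < 2 ^ N) :
    PySem.Int.bor r (Int.not (((1 : Int) <<< N) - 1)) = r - 2 ^ N := by
  rw [pv_one_shl, pv_not_eq, show (-((2 : Int) ^ N - 1 + 1)) = -(2 ^ N) by ring]
  have hpow : (0 : Int) < 2 ^ N := by positivity
  have hneg : ¬ (0 ≤ -(2 : Int) ^ N) := by omega
  rw [PySem.Int.bor, if_pos h0, if_neg hneg]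
  have he : (-(-(2 : Int) ^ N) - 1).toNat = 2 ^ N - 1 := by
    have h : (-(-(2 : Int) ^ N) - 1) = ((2 ^ N - 1 : Nat) : Int) := by
      push_cast [Nat.one_le_two_pow]; ring
    rw [h, Int.toNat_natCast]
  rw [he]
  have hp2 : ((2 : Int) ^ N) = ((2 ^ N : Nat) : Int) := by push_cast; ring
  have hrlt : r.toNat < 2 ^ N := by omega
  have hand : (2 ^ N - 1) &&& r.toNat = r.toNat := by
    rw [Nat.land_comm, Nat.and_two_pow_sub_one_eq_mod, Nat.mod_eq_of_lt hrlt]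
  rw [hand]
  have h2 : ((2 : Nat) ^ N - 1 - r.toNat : Nat) = ((2 ^ N - 1 : Nat) : Int) - r := by
    push_cast; omega
  omega

-- ---- mod/div-by-powers-of-two toolkit ----

theorem pv_ediv_ediv (a : Int) (k : Nat) : a / 2 / 2 ^ k = a / 2 ^ (k+1) := by
  rw [Int.ediv_ediv_of_nonneg (by norm_num : (0:Int) ≤ 2), pow_succ]
  ring_nf

theorem pv_mod_pow_succ (k : Nat) (t : Int) : t % 2 ^ (k+1) = 2 * (t / 2 % 2 ^ k) + t % 2 := by
  have eq1 : (2:Int) ^ k * (t / 2 / 2 ^ k) + t / 2 % 2 ^ k = t / 2 := Int.ediv_add_emod _ _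
  have eq2 : 2 * (t / 2) + t % 2 = t := Int.ediv_add_emod _ _
  have hb1 : 0 ≤ t / 2 % 2 ^ k ∧ t / 2 % 2 ^ k < 2 ^ k :=
    ⟨Int.emod_nonneg _ (by positivity), Int.emod_lt_of_pos _ (by positivity)⟩
  have hb2 : 0 ≤ t % 2 ∧ t % 2 < 2 := ⟨Int.emod_nonneg _ (by omega), Int.emod_lt_of_pos _ (by omega)⟩
  have e : t = (2 * (t / 2 % 2 ^ k) + t % 2) + (t / 2 / 2 ^ k) * 2 ^ (k+1) := by
    rw [pow_succ]; linear_combination (-2 : Int) * eq1 - eq2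
  conv_lhs => rw [e]
  rw [Int.add_mul_emod_self_right]
  rw [Int.emod_eq_of_lt (by omega) (by rw [pow_succ]; omega)]

theorem pv_mod_pow_succ' (k : Nat) (t : Int) :
    t % 2 ^ (k+1) = (t / 2 ^ k % 2) * 2 ^ k + t % 2 ^ k := by
  have eq1 : (2:Int) * (t / 2 ^ k / 2) + t / 2 ^ k % 2 = t / 2 ^ k := Int.ediv_add_emod _ _
  have eq2 : (2:Int) ^ k * (t / 2 ^ k) + t % 2 ^ k = t := Int.ediv_add_emod _ _
  have hb1 : 0 ≤ t % 2 ^ k ∧ t % 2 ^ k < 2 ^ k :=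
    ⟨Int.emod_nonneg _ (by positivity), Int.emod_lt_of_pos _ (by positivity)⟩
  have hb2 : 0 ≤ t / 2 ^ k % 2 ∧ t / 2 ^ k % 2 < 2 :=
    ⟨Int.emod_nonneg _ (by omega), Int.emod_lt_of_pos _ (by omega)⟩
  have e : t = ((t / 2 ^ k % 2) * 2 ^ k + t % 2 ^ k) + (t / 2 ^ k / 2) * 2 ^ (k+1) := by
    rw [pow_succ]; linear_combination (-(2:Int) ^ k) * eq1 - eq2
  conv_lhs => rw [e]
  rw [Int.add_mul_emod_self_right]
  rw [Int.emod_eq_of_lt (by nlinarith) (by rw [pow_succ]; nlinarith)]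

theorem pv_div_pow_succ (k : Nat) (t : Int) : t % 2 ^ (k+1) / 2 ^ k = t / 2 ^ k % 2 := by
  have h := pv_mod_pow_succ' k t
  have hb1 : 0 ≤ t % 2 ^ k ∧ t % 2 ^ k < 2 ^ k :=
    ⟨Int.emod_nonneg _ (by positivity), Int.emod_lt_of_pos _ (by positivity)⟩
  rw [h, Int.add_comm, Int.add_mul_ediv_right _ _ (by positivity : (0:Int) < 2 ^ k).ne',
      Int.ediv_eq_zero_of_lt hb1.1 hb1.2]
  omega

theorem pv_mod_pow_mod (k : Nat) (t : Int) : t % 2 ^ (k+1) % 2 ^ k = t % 2 ^ k := by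
  have h := pv_mod_pow_succ' k t
  have hb1 : 0 ≤ t % 2 ^ k ∧ t % 2 ^ k < 2 ^ k :=
    ⟨Int.emod_nonneg _ (by positivity), Int.emod_lt_of_pos _ (by positivity)⟩
  rw [h, Int.add_comm, Int.add_mul_emod_self_right, Int.emod_eq_of_lt hb1.1 hb1.2]

theorem pv_add_mod (M a b : Int) : (a % M + b % M + 0) % M = (a + b) % M := by
  rw [add_zero, ← Int.add_emod]

theorem pv_addsub_mod (M a b : Int) : (a % M + (M - b % M) % M + 0) % M = (a - b) % M := by
  rw [add_zero]
  have hMM : M ≡ 0 [ZMOD M] := by unfold Int.ModEq; simp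
  have ha : a % M ≡ a [ZMOD M] := Int.emod_emod_of_dvd a dvd_rfl
  have hb : b % M ≡ b [ZMOD M] := Int.emod_emod_of_dvd b dvd_rfl
  have h : a % M + (M - b % M) % M ≡ a - b [ZMOD M] := by
    calc a % M + (M - b % M) % M ≡ a + (M - b % M) [ZMOD M] :=
          Int.ModEq.add ha (Int.emod_emod_of_dvd _ dvd_rfl)
      _ ≡ a + (0 - b) [ZMOD M] := Int.ModEq.add_left a (Int.ModEq.sub hMM hb)
      _ = a - b := by ring
  exact h

-- ---- bitsE / bval facts ----

theorem pv_length_bitsE (k : Nat) (t : Int) : (bitsE k t).length = k := by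
  induction k generalizing t with
  | zero => rfl
  | succ k ih => simp [bitsE, ih]

theorem pv_bits01_bitsE (k : Nat) (t : Int) : bits01 (bitsE k t) := by
  induction k generalizing t with
  | zero => intro x hx; simp [bitsE] at hx
  | succ k ih =>
    intro x hx
    simp only [bitsE, List.mem_append, List.mem_singleton] at hx
    rcases hx with hx | hx
    · exact ih _ _ hx
    · subst hx
      have := Int.emod_nonneg t (by omega : (2:Int) ≠ 0)
      have := Int.emod_lt_of_pos t (by omega : (0:Int) < 2)
      omega

theorem pv_bval_append (l : List Int) (b : Int) : bval (l ++ [b]) = 2 * bval l + b := by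
  simp [bval, List.foldl_append]

theorem pv_bval_from (l : List Int) (r : Int) :
    l.foldl (fun r b => 2 * r + b) r = r * 2 ^ l.length + bval l := by
  induction l generalizing r with
  | nil => simp [bval]
  | cons x xs ih =>
    simp only [List.foldl_cons, List.length_cons]
    rw [ih (2 * r + x)]
    have hx : bval (x :: xs) = x * 2 ^ xs.length + bval xs := by
      simp only [bval, List.foldl_cons, mul_zero, zero_add]
      exact ih x
    rw [show bval (x :: xs) = x * 2 ^ xs.length + bval xs from hx, pow_succ]
    ring

theorem pv_bval_cons (x : Int) (l : List Int) : bval (x :: l) = x * 2 ^ l.length + bval l := by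
  simp only [bval, List.foldl_cons, mul_zero, zero_add]
  exact pv_bval_from l x

theorem pv_bval_bounds (l : List Int) (h : bits01 l) : 0 ≤ bval l ∧ bval l < 2 ^ l.length := by
  induction l using List.reverseRecOn with
  | nil => simp [bval]
  | append_singleton xs b ih =>
    have hxs := ih (fun x hx => h x (by simp [hx]))
    have hb : b = 0 ∨ b = 1 := h b (by simp)
    rw [pv_bval_append]
    simp only [List.length_append, List.length_singleton, pow_succ]
    constructor <;> rcases hb with rfl|rfl <;> omega

theorem pv_bval_bitsE (k : Nat) (t : Int) : bval (bitsE k t) = t % 2 ^ k := by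
  induction k generalizing t with
  | zero => simp [bitsE, bval]
  | succ k ih =>
    show bval (bitsE k (t / 2) ++ [t % 2]) = _
    rw [pv_bval_append, ih, pv_mod_pow_succ]

theorem pv_bitsE_cons (k : Nat) (v : Int) :
    bitsE (k+1) v = ((v / 2 ^ k) % 2) :: bitsE k v := by
  induction k generalizing v with
  | zero => simp [bitsE]
  | succ k ih =>
    show bitsE (k+1) (v / 2) ++ [v % 2] = _
    rw [ih (v / 2), pv_ediv_ediv]
    rfl

theorem pv_bitsE_congr (k : Nat) (v w : Int) (h : v % 2 ^ k = w % 2 ^ k) : bitsE k v = bitsE k w := by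
  induction k generalizing v w with
  | zero => rfl
  | succ k ih =>
    have hv := pv_mod_pow_succ k v
    have hw := pv_mod_pow_succ k w
    have hbv : 0 ≤ v % 2 ∧ v % 2 < 2 := ⟨Int.emod_nonneg _ (by omega), Int.emod_lt_of_pos _ (by omega)⟩
    have hbw : 0 ≤ w % 2 ∧ w % 2 < 2 := ⟨Int.emod_nonneg _ (by omega), Int.emod_lt_of_pos _ (by omega)⟩
    have hbv2 : 0 ≤ v / 2 % 2 ^ k ∧ v / 2 % 2 ^ k < 2 ^ k :=
      ⟨Int.emod_nonneg _ (by positivity), Int.emod_lt_of_pos _ (by positivity)⟩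
    have hbw2 : 0 ≤ w / 2 % 2 ^ k ∧ w / 2 % 2 ^ k < 2 ^ k :=
      ⟨Int.emod_nonneg _ (by positivity), Int.emod_lt_of_pos _ (by positivity)⟩
    have h1 : v % 2 = w % 2 := by omega
    have h2 : v / 2 % 2 ^ k = w / 2 % 2 ^ k := by omega
    show bitsE k (v / 2) ++ [v % 2] = bitsE k (w / 2) ++ [w % 2]
    rw [ih _ _ h2, h1]

-- ---- loop characterisations ----

theorem pv_bits_loop (l : List Int) (t : Int) (acc : List Int) :
    (l.foldl (fun (st : Int × List Int) _ =>
        (st.1 >>> (1 : Nat), PySem.Int.band st.1 1 :: st.2)) (t, acc)).2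
      = bitsE l.length t ++ acc := by
  induction l generalizing t acc with
  | nil => simp [bitsE]
  | cons x xs ih =>
    simp only [List.foldl_cons, List.length_cons]
    rw [pv_shiftr1, pv_band1, ih]
    show bitsE xs.length (t / 2) ++ ([t % 2] ++ acc) = _
    rw [← List.append_assoc]
    rfl

theorem pv_binloop (n1 : Int) (t : Int) :
    ((PySem.List.pyRange 0 n1 1).foldl (fun (st : Int × List Int) _ =>
        (st.1 >>> (1 : Nat), PySem.Int.band st.1 1 :: st.2)) (t, [])).2
      = bitsE n1.toNat t := by
  rw [pv_bits_loop, PySem.List.length_pyRange_one]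
  simp

theorem pv_ripple_spec (ps : List (Int × Int)) (c0 : Int)
    (hp : ∀ p ∈ ps, (p.1 = 0 ∨ p.1 = 1) ∧ (p.2 = 0 ∨ p.2 = 1)) (hc : c0 = 0 ∨ c0 = 1) :
    pvRipple ps c0 =
      (bitsE ps.length ((bval (ps.map Prod.fst) + bval (ps.map Prod.snd) + c0) % 2 ^ ps.length),
       (bval (ps.map Prod.fst) + bval (ps.map Prod.snd) + c0) / 2 ^ ps.length) := by
  induction ps with
  | nil => simp [pvRipple, bitsE, bval]
  | cons p ps ih =>
    have hp' : ∀ q ∈ ps, (q.1 = 0 ∨ q.1 = 1) ∧ (q.2 = 0 ∨ q.2 = 1) := fun q hq => hp q (by simp [hq])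
    have hph := hp p (by simp)
    have b1 := pv_bval_bounds (ps.map Prod.fst) (fun x hx => by
      obtain ⟨q, hq, rfl⟩ := List.mem_map.1 hx; exact (hp' q hq).1)
    have b2 := pv_bval_bounds (ps.map Prod.snd) (fun x hx => by
      obtain ⟨q, hq, rfl⟩ := List.mem_map.1 hx; exact (hp' q hq).2)
    rw [List.length_map] at b1 b2
    have hVb : 0 ≤ bval (ps.map Prod.fst) + bval (ps.map Prod.snd) + c0 ∧
        bval (ps.map Prod.fst) + bval (ps.map Prod.snd) + c0 < 2 ^ (ps.length + 1) := by
      constructor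
      · omega
      · rw [pow_succ]; omega
    have hc' : (bval (ps.map Prod.fst) + bval (ps.map Prod.snd) + c0) / 2 ^ ps.length = 0 ∨
        (bval (ps.map Prod.fst) + bval (ps.map Prod.snd) + c0) / 2 ^ ps.length = 1 := by
      have h0 : 0 ≤ (bval (ps.map Prod.fst) + bval (ps.map Prod.snd) + c0) / 2 ^ ps.length :=
        Int.ediv_nonneg hVb.1 (by positivity)
      have h1 : (bval (ps.map Prod.fst) + bval (ps.map Prod.snd) + c0) / 2 ^ ps.length < 2 := by
        rw [Int.ediv_lt_iff_lt_mul (by positivity)]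
        have h2 : (2:Int) ^ (ps.length+1) = 2 * 2 ^ ps.length := by rw [pow_succ]; ring
        omega
      omega
    show pvPairStep p (pvRipple ps c0) = _
    rw [ih hp']
    simp only [pvPairStep, pv_FA _ _ _ hph.1 hph.2 hc']
    have hVcons : bval ((p :: ps).map Prod.fst) + bval ((p :: ps).map Prod.snd) + c0
        = (p.1 + p.2) * 2 ^ ps.length + (bval (ps.map Prod.fst) + bval (ps.map Prod.snd) + c0) := by
      simp only [List.map_cons]
      rw [pv_bval_cons, pv_bval_cons]
      simp only [List.length_map]
      ring
    simp only [List.length_cons, hVcons]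
    have hdiv : ((p.1 + p.2) * 2 ^ ps.length + (bval (ps.map Prod.fst) + bval (ps.map Prod.snd) + c0))
        / 2 ^ ps.length
        = p.1 + p.2 + (bval (ps.map Prod.fst) + bval (ps.map Prod.snd) + c0) / 2 ^ ps.length := by
      rw [Int.add_comm, Int.add_mul_ediv_right _ _ (by positivity : (0:Int) < 2 ^ ps.length).ne']
      ring
    rw [Prod.ext_iff]
    constructor
    · -- first components
      show _ = bitsE (ps.length + 1) _
      rw [pv_bitsE_cons]
      have hhead : ((p.1 + p.2) * 2 ^ ps.length + (bval (ps.map Prod.fst) + bval (ps.map Prod.snd) + c0))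
          % 2 ^ (ps.length + 1) / 2 ^ ps.length % 2
          = (p.1 + p.2 + (bval (ps.map Prod.fst) + bval (ps.map Prod.snd) + c0) / 2 ^ ps.length) % 2 := by
        rw [pv_div_pow_succ, hdiv]
        rw [Int.emod_emod_of_dvd _ dvd_rfl]
      have htail : bitsE ps.length
            (((p.1 + p.2) * 2 ^ ps.length + (bval (ps.map Prod.fst) + bval (ps.map Prod.snd) + c0))
              % 2 ^ (ps.length + 1))
          = bitsE ps.length ((bval (ps.map Prod.fst) + bval (ps.map Prod.snd) + c0) % 2 ^ ps.length) := by
        apply pv_bitsE_congr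
        rw [pv_mod_pow_mod, Int.add_comm, Int.add_mul_emod_self_right,
            Int.emod_emod_of_dvd _ dvd_rfl]
      rw [hhead, htail]
    · -- second components
      show _ = _ / 2 ^ (ps.length + 1)
      rw [show ((p.1 + p.2) * 2 ^ ps.length + (bval (ps.map Prod.fst) + bval (ps.map Prod.snd) + c0))
            / 2 ^ (ps.length + 1)
          = ((p.1 + p.2) * 2 ^ ps.length + (bval (ps.map Prod.fst) + bval (ps.map Prod.snd) + c0))
            / 2 ^ ps.length / 2 by
        rw [Int.ediv_ediv_of_nonneg (by positivity), pow_succ]]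
      rw [hdiv]

-- ---- bridging the index-based loops to structural folds ----

theorem pv_ripple_init (ps : List (Int × Int)) (S0 : List Int) (c : Int) :
    ps.foldr pvPairStep (S0, c) = ((pvRipple ps c).1 ++ S0, (pvRipple ps c).2) := by
  induction ps with
  | nil => simp [pvRipple]
  | cons p ps ih =>
    simp only [List.foldr_cons, ih]
    show pvPairStep p _ = _
    rw [show pvRipple (p :: ps) c = pvPairStep p (pvRipple ps c) from rfl]
    simp [pvPairStep]

theorem pv_pyGetD_last (l : List Int) (a : Int) :
    PySem.List.pyGetD (l ++ [a]) ((l.length : Int)) 0 = a := by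
  rw [PySem.List.pyGetD_natCast]
  rw [List.getD_append_right _ _ _ _ (le_refl _)]
  simp

theorem pv_pyGetD_prefix (l : List Int) (a : Int) (i : Int) (h0 : 0 ≤ i) (h1 : i < (l.length : Int)) :
    PySem.List.pyGetD (l ++ [a]) i 0 = PySem.List.pyGetD l i 0 := by
  obtain ⟨k, rfl⟩ := Int.eq_ofNat_of_zero_le h0
  rw [PySem.List.pyGetD_natCast, PySem.List.pyGetD_natCast]
  exact List.getD_append _ _ _ _ (by exact_mod_cast h1)

theorem pv_idx_loop (m : Nat) (As Bs : List Int) (hA : As.length = m) (hB : Bs.length = m)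
    (S : List Int) (c : Int) :
    (PySem.List.pyRange ((m : Int) - 1) (-1) (-1)).foldl
      (fun (st : List Int × Int) i =>
        ((pvFullAdder (PySem.List.pyGetD As i 0) (PySem.List.pyGetD Bs i 0) st.2).1 :: st.1,
         (pvFullAdder (PySem.List.pyGetD As i 0) (PySem.List.pyGetD Bs i 0) st.2).2)) (S, c)
    = ((pvRipple (As.zip Bs) c).1 ++ S, (pvRipple (As.zip Bs) c).2) := by
  induction m generalizing As Bs S c with
  | zero =>
    rw [PySem.List.pyRange_neg_one_eq_nil (by norm_num)]
    obtain rfl : As = [] := List.eq_nil_of_length_eq_zero hA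
    obtain rfl : Bs = [] := List.eq_nil_of_length_eq_zero hB
    simp [pvRipple]
  | succ m ih =>
    obtain ⟨As', a, rfl⟩ : ∃ l x, As = l ++ [x] := by
      cases As using List.reverseRecOn with
      | nil => simp at hA
      | append_singleton l x => exact ⟨l, x, rfl⟩
    obtain ⟨Bs', b, rfl⟩ : ∃ l x, Bs = l ++ [x] := by
      cases Bs using List.reverseRecOn with
      | nil => simp at hB
      | append_singleton l x => exact ⟨l, x, rfl⟩
    have hA' : As'.length = m := by simpa using hA
    have hB' : Bs'.length = m := by simpa using hB
    have hstep : ((m+1 : Nat) : Int) - 1 = (m : Int) := by push_cast; ring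
    rw [hstep, PySem.List.pyRange_neg_one_cons (by omega : (-1 : Int) < (m : Int)),
        List.foldl_cons]
    have hgA : PySem.List.pyGetD (As' ++ [a]) ((m : Int)) 0 = a := by
      rw [← hA']; exact pv_pyGetD_last As' a
    have hgB : PySem.List.pyGetD (Bs' ++ [b]) ((m : Int)) 0 = b := by
      rw [← hB']; exact pv_pyGetD_last Bs' b
    rw [hgA, hgB]
    have hcongr : ∀ (st : List Int × Int), ∀ i ∈ PySem.List.pyRange ((m : Int) - 1) (-1) (-1),
        ((pvFullAdder (PySem.List.pyGetD (As' ++ [a]) i 0) (PySem.List.pyGetD (Bs' ++ [b]) i 0) st.2).1 :: st.1,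
         (pvFullAdder (PySem.List.pyGetD (As' ++ [a]) i 0) (PySem.List.pyGetD (Bs' ++ [b]) i 0) st.2).2)
        = ((pvFullAdder (PySem.List.pyGetD As' i 0) (PySem.List.pyGetD Bs' i 0) st.2).1 :: st.1,
           (pvFullAdder (PySem.List.pyGetD As' i 0) (PySem.List.pyGetD Bs' i 0) st.2).2) := by
      intro st i hi
      rw [PySem.List.mem_pyRange_neg_one] at hi
      rw [pv_pyGetD_prefix As' a i (by omega) (by omega),
          pv_pyGetD_prefix Bs' b i (by omega) (by omega)]
    rw [PySem.List.foldl_congr_mem _ _ _ _ (fun acc x hx => hcongr acc x hx)]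
    rw [ih As' Bs' hA' hB']
    have hz : (As' ++ [a]).zip (Bs' ++ [b]) = As'.zip Bs' ++ [(a, b)] := by
      rw [List.zip_append (by omega)]
      rfl
    rw [hz]
    have hr : pvRipple (As'.zip Bs' ++ [(a, b)]) c
        = ((pvRipple (As'.zip Bs') ((pvFullAdder a b c).2)).1 ++ [(pvFullAdder a b c).1],
           (pvRipple (As'.zip Bs') ((pvFullAdder a b c).2)).2) := by
      rw [pvRipple, List.foldr_append]
      show (As'.zip Bs').foldr pvPairStep (pvPairStep (a, b) ([], c)) = _
      rw [show pvPairStep (a, b) ([], c) = ([(pvFullAdder a b c).1], (pvFullAdder a b c).2) from rfl]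
      exact pv_ripple_init _ _ _
    rw [hr]
    simp

theorem pv_mainloop (As Bs : List Int) (m : Nat) (hA : As.length = m) (hB : Bs.length = m) :
    (PySem.List.pyRange ((m : Int) - 1) (-1) (-1)).foldl
      (fun (st : List Int × Int) i =>
        ((pvFullAdder (PySem.List.pyGetD As i 0) (PySem.List.pyGetD Bs i 0) st.2).1 :: st.1,
         (pvFullAdder (PySem.List.pyGetD As i 0) (PySem.List.pyGetD Bs i 0) st.2).2)) ([], 0)
    = pvRipple (As.zip Bs) 0 := by
  rw [pv_idx_loop m As Bs hA hB [] 0]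
  simp

theorem pv_incloop (l : List Int) :
    l.reverse.foldl (fun (st : List Int × Int) bit =>
        ((pvFullAdder bit 0 st.2).1 :: st.1, (pvFullAdder bit 0 st.2).2)) ([], 1)
      = pvRipple (l.map (fun b => (b, 0))) 1 := by
  rw [List.foldl_reverse, pvRipple, List.foldr_map]
  rfl

-- ---- complement pass ----

theorem pv_compl_map (l : List Int) (h : bits01 l) :
    l.foldl (fun acc bit => acc ++ [pvAND (pvNOT bit) 1]) []
      = l.map (fun b => 1 - b) := by
  rw [PySem.List.foldl_append_singleton_eq_map]
  apply List.map_congr_left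
  intro x hx
  rcases h x hx with rfl | rfl <;> decide

theorem pv_bits01_compl (l : List Int) (h : bits01 l) : bits01 (l.map (fun b => 1 - b)) := by
  intro x hx
  obtain ⟨y, hy, rfl⟩ := List.mem_map.1 hx
  rcases h y hy with rfl | rfl <;> simp

theorem pv_bval_compl (l : List Int) (h : bits01 l) :
    bval (l.map (fun b => 1 - b)) = 2 ^ l.length - 1 - bval l := by
  induction l using List.reverseRecOn with
  | nil => simp [bval]
  | append_singleton xs b ih =>
    rw [List.map_append, List.map_singleton, pv_bval_append, pv_bval_append,
        ih (fun x hx => h x (by simp [hx]))]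
    simp only [List.length_append, List.length_singleton, pow_succ]
    ring

theorem pv_bval_zeros {α : Type} (l : List α) : bval (l.map (fun _ => (0 : Int))) = 0 := by
  induction l with
  | nil => simp [bval]
  | cons x xs ih => rw [List.map_cons, pv_bval_cons, ih]; ring

-- ---- integer reassembly ----

theorem pv_shiftor_fold (l : List Int) (r : Int) (hr : 0 ≤ r) (h : bits01 l) :
    l.foldl (fun r bit => PySem.Int.bor (r <<< (1 : Nat)) bit) r
      = l.foldl (fun r b => 2 * r + b) r := by
  induction l generalizing r with
  | nil => rfl
  | cons x xs ih =>
    simp only [List.foldl_cons]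
    have hx := h x (by simp)
    have hstep : PySem.Int.bor (r <<< (1 : Nat)) x = 2 * r + x := by
      rw [show r <<< (1:Nat) = 2 * r by rw [Int.shiftLeft_eq]; ring]
      rcases hx with rfl | rfl
      · simp [PySem.Int.bor_zero]
      · exact pv_bor1 r hr
    rw [hstep]
    exact ih (2 * r + x) (by rcases hx with rfl | rfl <;> omega) (fun y hy => h y (by simp [hy]))

theorem pv_resultInt (l : List Int) (h : bits01 l) :
    l.foldl (fun r bit => PySem.Int.bor (r <<< (1 : Nat)) bit) 0 = bval l :=
  pv_shiftor_fold l 0 le_rfl h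

-- ---- final sign-extension step, shared by both cases ----

theorem pv_tail (K : Nat) (x : Int) :
    (if PySem.List.pyGetD (bitsE (K+1) (x % 2 ^ (K+1))) 0 0 == 1 then
       PySem.Int.bor ((bitsE (K+1) (x % 2 ^ (K+1))).foldl
           (fun r bit => PySem.Int.bor (r <<< (1 : Nat)) bit) 0)
         (Int.not (((1 : Int) <<< (K+1)) - 1))
     else (bitsE (K+1) (x % 2 ^ (K+1))).foldl
           (fun r bit => PySem.Int.bor (r <<< (1 : Nat)) bit) 0)
    = (if x % 2 ^ (K+1) ≥ 2 ^ K then x % 2 ^ (K+1) - 2 ^ (K+1) else x % 2 ^ (K+1)) := by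
  have hpos : (0 : Int) < 2 ^ (K+1) := by positivity
  have hb : 0 ≤ x % 2 ^ (K+1) ∧ x % 2 ^ (K+1) < 2 ^ (K+1) :=
    ⟨Int.emod_nonneg _ (by omega), Int.emod_lt_of_pos _ hpos⟩
  have hw : x % 2 ^ (K+1) % 2 ^ (K+1) = x % 2 ^ (K+1) := Int.emod_emod_of_dvd _ dvd_rfl
  rw [pv_resultInt _ (pv_bits01_bitsE _ _), pv_bval_bitsE, hw]
  rw [pv_bitsE_cons, pv_pyGetD_zero]
  by_cases hge : 2 ^ K ≤ x % 2 ^ (K+1)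
  · have hdiv1 : x % 2 ^ (K+1) / 2 ^ K = 1 := by
      have h1 : 1 ≤ x % 2 ^ (K+1) / 2 ^ K := by
        rw [Int.le_ediv_iff_mul_le (by positivity)]; omega
      have h2 : x % 2 ^ (K+1) / 2 ^ K < 2 := by
        rw [Int.ediv_lt_iff_lt_mul (by positivity)]
        have : (2:Int) ^ (K+1) = 2 * 2 ^ K := by rw [pow_succ]; ring
        omega
      omega
    rw [hdiv1]
    rw [if_pos (by norm_num), if_pos hge]
    exact pv_masklor (K+1) _ hb.1 hb.2
  · have hdiv0 : x % 2 ^ (K+1) / 2 ^ K = 0 := Int.ediv_eq_zero_of_lt hb.1 (by omega)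
    rw [hdiv0]
    rw [if_neg (by norm_num), if_neg (by omega)]

-- the value of port B, in arithmetic form
theorem pv_alt_eq (A B : Int) (K : Nat) (subtract : Bool) :
    AddSub_alt A B ((K+1 : Nat) : Int) subtract
      = (if (if subtract then A - B else A + B) % 2 ^ (K+1) ≥ 2 ^ K
         then (if subtract then A - B else A + B) % 2 ^ (K+1) - 2 ^ (K+1)
         else (if subtract then A - B else A + B) % 2 ^ (K+1)) := by
  have hpos : (0 : Int) < 2 ^ (K+1) := by positivity
  simp only [AddSub_alt, Int.toNat_natCast, pv_one_shl, pv_shiftr1,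
             PySem.Int.mod_eq_emod_of_pos hpos]
  rw [show ((2:Int) ^ (K+1)) / 2 = 2 ^ K by rw [pow_succ, Int.mul_ediv_cancel _ (by omega)]]

-- ===== VERDICT (by name: the statement is the Claim_ definition above) =====
theorem AddSub_spec : Claim_equal_AddSub := by
  intro A B n subtract _ hpre
  unfold Pre_AddSub at hpre
  unfold Spec_AddSub
  obtain ⟨N, rfl⟩ := Int.eq_ofNat_of_zero_le (by omega : (0:Int) ≤ n)
  obtain ⟨K, rfl⟩ : ∃ K, N = K + 1 := ⟨N - 1, by omega⟩
  have hpos : (0 : Int) < 2 ^ (K+1) := by positivity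
  rw [pv_alt_eq]
  simp only [AddSub, Int.toNat_natCast]
  rw [pv_binloop, pv_binloop]
  simp only [Int.toNat_natCast]
  cases subtract with
  | false =>
    simp only [Bool.false_eq_true, if_false]
    rw [pv_mainloop (bitsE (K+1) A) (bitsE (K+1) B) (K+1) (pv_length_bitsE _ _) (pv_length_bitsE _ _)]
    have hp : ∀ p ∈ (bitsE (K+1) A).zip (bitsE (K+1) B), (p.1 = 0 ∨ p.1 = 1) ∧ (p.2 = 0 ∨ p.2 = 1) := by
      intro p hp
      have := List.of_mem_zip hp
      exact ⟨pv_bits01_bitsE _ _ _ this.1, pv_bits01_bitsE _ _ _ this.2⟩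
    rw [pv_ripple_spec _ 0 hp (Or.inl rfl)]
    have hlen : ((bitsE (K+1) A).zip (bitsE (K+1) B)).length = K + 1 := by
      rw [List.length_zip, pv_length_bitsE, pv_length_bitsE]; simp
    have hfst : ((bitsE (K+1) A).zip (bitsE (K+1) B)).map Prod.fst = bitsE (K+1) A :=
      List.map_fst_zip (by rw [pv_length_bitsE, pv_length_bitsE])
    have hsnd : ((bitsE (K+1) A).zip (bitsE (K+1) B)).map Prod.snd = bitsE (K+1) B :=
      List.map_snd_zip (by rw [pv_length_bitsE, pv_length_bitsE])
    rw [hlen, hfst, hsnd, pv_bval_bitsE, pv_bval_bitsE]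
    rw [show (A % 2 ^ (K+1) + B % 2 ^ (K+1) + 0) = (A % 2 ^ (K+1) + B % 2 ^ (K+1) + 0) from rfl,
        pv_add_mod]
    exact pv_tail K (A + B)
  | true =>
    simp only [if_true]
    rw [pv_compl_map _ (pv_bits01_bitsE _ _), pv_incloop]
    have hp1 : ∀ p ∈ ((bitsE (K+1) B).map (fun b => 1 - b)).map (fun b => (b, 0)),
        (p.1 = 0 ∨ p.1 = 1) ∧ (p.2 = (0:Int) ∨ p.2 = 1) := by
      intro p hp
      obtain ⟨y, hy, rfl⟩ := List.mem_map.1 hp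
      exact ⟨pv_bits01_compl _ (pv_bits01_bitsE _ _) y hy, Or.inl rfl⟩
    rw [pv_ripple_spec _ 1 hp1 (Or.inr rfl)]
    have hlen1 : (((bitsE (K+1) B).map (fun b => 1 - b)).map (fun b => (b, (0:Int)))).length = K + 1 := by
      simp [pv_length_bitsE]
    have hfst1 : (((bitsE (K+1) B).map (fun b => 1 - b)).map (fun b => (b, (0:Int)))).map Prod.fst
        = (bitsE (K+1) B).map (fun b => 1 - b) := by
      rw [List.map_map]; simp
    have hsnd1 : bval ((((bitsE (K+1) B).map (fun b => 1 - b)).map (fun b => (b, (0:Int)))).map Prod.snd) = 0 := by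
      rw [List.map_map]
      exact pv_bval_zeros _
    rw [hlen1, hfst1, hsnd1, pv_bval_compl _ (pv_bits01_bitsE _ _), pv_bval_bitsE, pv_length_bitsE]
    rw [pv_mainloop (bitsE (K+1) A) _ (K+1) (pv_length_bitsE _ _) (pv_length_bitsE _ _)]
    have hp : ∀ p ∈ (bitsE (K+1) A).zip
        (bitsE (K+1) ((2 ^ (K+1) - 1 - B % 2 ^ (K+1) + 0 + 1) % 2 ^ (K+1))),
        (p.1 = 0 ∨ p.1 = 1) ∧ (p.2 = 0 ∨ p.2 = 1) := by
      intro p hp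
      have := List.of_mem_zip hp
      exact ⟨pv_bits01_bitsE _ _ _ this.1, pv_bits01_bitsE _ _ _ this.2⟩
    rw [pv_ripple_spec _ 0 hp (Or.inl rfl)]
    have hlen : ((bitsE (K+1) A).zip
        (bitsE (K+1) ((2 ^ (K+1) - 1 - B % 2 ^ (K+1) + 0 + 1) % 2 ^ (K+1)))).length = K + 1 := by
      rw [List.length_zip, pv_length_bitsE, pv_length_bitsE]; simp
    have hfst : ((bitsE (K+1) A).zip
        (bitsE (K+1) ((2 ^ (K+1) - 1 - B % 2 ^ (K+1) + 0 + 1) % 2 ^ (K+1)))).map Prod.fst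
        = bitsE (K+1) A :=
      List.map_fst_zip (by rw [pv_length_bitsE, pv_length_bitsE])
    have hsnd : ((bitsE (K+1) A).zip
        (bitsE (K+1) ((2 ^ (K+1) - 1 - B % 2 ^ (K+1) + 0 + 1) % 2 ^ (K+1)))).map Prod.snd
        = bitsE (K+1) ((2 ^ (K+1) - 1 - B % 2 ^ (K+1) + 0 + 1) % 2 ^ (K+1)) :=
      List.map_snd_zip (by rw [pv_length_bitsE, pv_length_bitsE])
    rw [hlen, hfst, hsnd, pv_bval_bitsE, pv_bval_bitsE]
    have hmm : ((2 ^ (K+1) - 1 - B % 2 ^ (K+1) + 0 + 1) % 2 ^ (K+1)) % 2 ^ (K+1)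
        = (2 ^ (K+1) - B % 2 ^ (K+1)) % 2 ^ (K+1) := by
      rw [Int.emod_emod_of_dvd _ dvd_rfl]
      ring_nf
    rw [hmm]
    rw [pv_addsub_mod]
    exact pv_tail K (A - B)
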